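-- pv_equiv track=rewrite | github.com/yocox/cpp2html | cpp2html.py | encode_html
-- ===== SOURCE A (Python) =====
-- def encode_html(s) :
--     result = ''
--     for c in s :
--         if c == '\n' :
--             result += '</li>\n<li>'
--         elif c == '<' :
--             result += '&lt;'
--         elif c == '>' :
--             result += '&gt;'
--         elif c == '&' :
--             result += '&amp;'
--         elif c == ' ' :
--             result += '&nbsp;'
--         elif c == '"' :
--             result += '&quot;'
--         else :
--             result += c
--     return result
-- ===== SOURCE B (Python) =====
-- def encode_html(s):
--     # staged whole-string passes: escape '&' first, then the others, newline last
--     # (the replacement texts introduce no character that a LATER pass rewrites)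
--     for old, new in (('&', '&amp;'), ('<', '&lt;'), ('>', '&gt;'),
--                      (' ', '&nbsp;'), ('"', '&quot;'), ('\n', '</li>\n<li>')):
--         s = s.replace(old, new)
--     return s
-- ===== Notes on version B (the rewrite author's own statement) =====
-- stated objective: alternative
-- what changed: Replaces A's single per-character pass with an if-elif chain by six staged whole-string str.replace passes, one per special character, ordered so no pass rewrites text introduced by an earlier one ('&' first, '\n' last).
import Mathlib
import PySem

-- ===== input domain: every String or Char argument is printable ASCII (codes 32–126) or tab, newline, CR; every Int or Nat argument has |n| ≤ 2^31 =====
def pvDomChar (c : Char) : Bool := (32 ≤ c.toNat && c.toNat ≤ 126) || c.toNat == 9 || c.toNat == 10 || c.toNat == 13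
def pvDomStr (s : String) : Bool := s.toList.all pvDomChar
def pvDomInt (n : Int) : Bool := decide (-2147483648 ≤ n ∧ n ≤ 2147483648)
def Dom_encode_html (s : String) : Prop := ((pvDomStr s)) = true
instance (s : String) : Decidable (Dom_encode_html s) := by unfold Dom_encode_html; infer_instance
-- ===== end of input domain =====

-- B replaces A's single per-character pass (if-elif chain) by six staged whole-string
-- replace passes, ordered so no pass rewrites text introduced by an earlier one (alternative decomposition).

-- ===== PORT A =====
-- A: loop over the characters, an if-elif chain appending each replacement to the accumulator
def encode_html (s : String) : String :=
  String.ofList (s.toList.foldl (fun result c =>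
    if c = '\n' then result ++ "</li>\n<li>".toList
    else if c = '<' then result ++ "&lt;".toList
    else if c = '>' then result ++ "&gt;".toList
    else if c = '&' then result ++ "&amp;".toList
    else if c = ' ' then result ++ "&nbsp;".toList
    else if c = '"' then result ++ "&quot;".toList
    else result ++ [c]) [])

-- ===== PORT B =====
-- B: six staged s.replace passes, '&' first and '\n' last
def pvRules : List (String × String) :=
  [("&", "&amp;"), ("<", "&lt;"), (">", "&gt;"),
   (" ", "&nbsp;"), ("\"", "&quot;"), ("\n", "</li>\n<li>")]

def encode_html_alt (s : String) : String :=
  pvRules.foldl (fun s p => PySem.Str.replace s p.1 p.2) s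

-- ===== PRECONDITION & SPEC =====
def Spec_encode_html (s : String) (out : String) : Prop := out = encode_html_alt s
instance (s : String) (out : String) : Decidable (Spec_encode_html s out) := by unfold Spec_encode_html; infer_instance

-- ===== CLAIM (what is proved, stated in full; the proofs are below) =====
def Claim_equal_encode_html : Prop := ∀ (s : String), Dom_encode_html s → Spec_encode_html s (encode_html s)

-- ===== LEMMAS AND PROOFS =====

-- replacing a SINGLE character a by new is the per-character flatMap
theorem pv_go_single (a : Char) (new : List Char) :
    ∀ (l acc : List Char) (fuel : Nat), l.length ≤ fuel →
      PySem.Chars.replace.go [a] new fuel l acc =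
        acc.reverse ++ l.flatMap (fun c => if c = a then new else [c]) := by
  intro l
  induction l with
  | nil =>
    intro acc fuel _
    cases fuel <;> simp [PySem.Chars.replace.go]
  | cons c t ih =>
    intro acc fuel hf
    cases fuel with
    | zero => simp at hf
    | succ n =>
      have hn : t.length ≤ n := by simpa using hf
      by_cases hc : c = a
      · subst hc
        have hp : [c].isPrefixOf (c :: t) = true := by simp [List.isPrefixOf]
        simp only [PySem.Chars.replace.go, hp, if_pos, List.length_cons, List.length_nil,
          Nat.zero_add, List.drop_succ_cons, List.drop_zero]
        rw [ih (new.reverse ++ acc) n hn]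
        simp
      · have hp : [a].isPrefixOf (c :: t) = false := by
          simp [List.isPrefixOf, Ne.symm hc]
        simp only [PySem.Chars.replace.go, hp]
        rw [ih (c :: acc) n hn]
        simp [hc]

theorem pv_replace_single (s : List Char) (a : Char) (new : List Char) :
    PySem.Chars.replace s [a] new = s.flatMap (fun c => if c = a then new else [c]) := by
  unfold PySem.Chars.replace
  simp only [List.isEmpty_cons]
  exact (by simpa using pv_go_single a new s [] s.length le_rfl)

-- A's per-character replacement
def pvF (c : Char) : List Char :=
  if c = '\n' then "</li>\n<li>".toList
  else if c = '<' then "&lt;".toList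
  else if c = '>' then "&gt;".toList
  else if c = '&' then "&amp;".toList
  else if c = ' ' then "&nbsp;".toList
  else if c = '"' then "&quot;".toList
  else [c]

-- A's loop, accumulator lifted out, equals the flatMap of pvF
theorem encode_html_foldl (l : List Char) :
    l.foldl (fun result c =>
      if c = '\n' then result ++ "</li>\n<li>".toList
      else if c = '<' then result ++ "&lt;".toList
      else if c = '>' then result ++ "&gt;".toList
      else if c = '&' then result ++ "&amp;".toList
      else if c = ' ' then result ++ "&nbsp;".toList
      else if c = '"' then result ++ "&quot;".toList
      else result ++ [c]) [] = l.flatMap pvF := by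
  rw [show (fun (result : List Char) c =>
      if c = '\n' then result ++ "</li>\n<li>".toList
      else if c = '<' then result ++ "&lt;".toList
      else if c = '>' then result ++ "&gt;".toList
      else if c = '&' then result ++ "&amp;".toList
      else if c = ' ' then result ++ "&nbsp;".toList
      else if c = '"' then result ++ "&quot;".toList
      else result ++ [c]) = (fun (result : List Char) c => result ++ pvF c) from by
    funext r c; unfold pvF; split_ifs <;> rfl]
  rw [PySem.List.foldl_append_eq_flatMap, List.nil_append]

-- shorthand for one single-character stage over a char list
def pvG (a : Char) (new : List Char) (l : List Char) : List Char :=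
  l.flatMap (fun c => if c = a then new else [c])

theorem pvG_append (a : Char) (new x y : List Char) :
    pvG a new (x ++ y) = pvG a new x ++ pvG a new y := by
  simp [pvG]

-- the six staged passes, applied in B's order, agree with A's single pass
theorem pv_stages (l : List Char) :
    pvG '\n' "</li>\n<li>".toList (pvG '"' "&quot;".toList (pvG ' ' "&nbsp;".toList
      (pvG '>' "&gt;".toList (pvG '<' "&lt;".toList (pvG '&' "&amp;".toList l))))) =
    l.flatMap pvF := by
  induction l with
  | nil => rfl
  | cons c t ih =>
    rw [show (c :: t) = [c] ++ t from rfl]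
    rw [pvG_append, pvG_append, pvG_append, pvG_append, pvG_append, pvG_append, ih,
      List.flatMap_append]
    congr 1
    by_cases h1 : c = '\n'
    · subst h1; decide
    by_cases h2 : c = '<'
    · subst h2; decide
    by_cases h3 : c = '>'
    · subst h3; decide
    by_cases h4 : c = '&'
    · subst h4; decide
    by_cases h5 : c = ' '
    · subst h5; decide
    by_cases h6 : c = '"'
    · subst h6; decide
    simp [pvG, pvF, h1, h2, h3, h4, h5, h6]

-- ===== VERDICT (by name: the statement is the Claim_ definition above) =====
theorem encode_html_spec : Claim_equal_encode_html := by
  intro s _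
  unfold Spec_encode_html encode_html encode_html_alt pvRules
  simp only [List.foldl_cons, List.foldl_nil, PySem.Str.replace]
  rw [encode_html_foldl]
  refine congrArg String.ofList ?_
  simp only [String.toList_ofList]
  rw [show "&".toList = ['&'] from rfl, show "<".toList = ['<'] from rfl,
    show ">".toList = ['>'] from rfl, show " ".toList = [' '] from rfl,
    show "\"".toList = ['"'] from rfl, show "\n".toList = ['\n'] from rfl]
  rw [pv_replace_single, pv_replace_single, pv_replace_single, pv_replace_single,
    pv_replace_single, pv_replace_single]
  exact (pv_stages s.toList).symm
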